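-- pv_equiv track=rewrite | github.com/kshavnair/marine-novelty | backend/main.py | clean_sequence
-- ===== SOURCE A (Python) =====
-- def clean_sequence(raw: str) -> str:
--     """Strip FASTA headers and non-ATCG characters, return uppercase."""
--     lines = raw.strip().splitlines()
--     bases = []
--     for line in lines:
--         if line.startswith(">"):
--             continue
--         bases.append("".join(c for c in line.upper() if c in "ATCG"))
--     return "".join(bases)
-- ===== SOURCE B (Python) =====
-- def clean_sequence(raw: str) -> str:
--     """Strip FASTA headers and non-ATCG characters, return uppercase.
--
--     Single streaming state machine over the characters: tracks whether we are
--     inside a header line, and maps/keeps bases via one lookup table.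
--     """
--     table = {'A': 'A', 'a': 'A', 'T': 'T', 't': 'T',
--              'C': 'C', 'c': 'C', 'G': 'G', 'g': 'G'}
--     out = []
--     in_header = False
--     at_line_start = True
--     for ch in raw.lstrip():
--         if ch == '\n' or ch == '\r':
--             in_header = False
--             at_line_start = True
--             continue
--         if at_line_start:
--             in_header = (ch == '>')
--             at_line_start = False
--         if not in_header:
--             mapped = table.get(ch)
--             if mapped is not None:
--                 out.append(mapped)
--     return ''.join(out)
-- ===== Notes on version B (the rewrite author's own statement) =====
-- stated objective: alternative
-- what changed: Replaced strip/splitlines plus a per-line uppercase-and-filter accumulator by a single streaming character-level state machine (in_header/at_line_start flags) over the lstripped text with one base lookup table, never materialising lines.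
import Mathlib
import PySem

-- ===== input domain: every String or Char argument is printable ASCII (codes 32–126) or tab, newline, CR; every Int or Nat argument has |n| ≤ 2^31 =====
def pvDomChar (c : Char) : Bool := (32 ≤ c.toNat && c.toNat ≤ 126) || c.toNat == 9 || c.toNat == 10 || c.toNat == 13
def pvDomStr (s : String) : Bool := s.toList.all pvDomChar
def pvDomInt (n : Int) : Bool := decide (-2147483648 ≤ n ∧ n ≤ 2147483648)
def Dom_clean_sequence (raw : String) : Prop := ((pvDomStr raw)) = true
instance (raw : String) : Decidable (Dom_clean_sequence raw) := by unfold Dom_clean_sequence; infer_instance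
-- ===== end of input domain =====

-- B replaces A's strip/splitlines + per-line uppercase-and-filter accumulator by a single streaming
-- character-level state machine (in_header / at_line_start flags) with one base lookup table.

-- ===== PORT A =====
-- per-line: "".join(c for c in line.upper() if c in "ATCG"); final "".join(bases)
def clean_sequence (raw : String) : String :=
  let lines := PySem.Str.splitlines (PySem.Str.strip raw)
  let bases := lines.foldl
    (fun (acc : List (List Char)) line =>
      if PySem.Str.startswith line ">" then acc
      else acc ++ [((PySem.Str.upper line).toList.filter (fun c => "ATCG".toList.contains c))])
    []
  String.ofList bases.flatten

-- ===== PORT B =====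
-- table.get(ch) on the literal base table
def csTable (c : Char) : Option Char :=
  if c = 'A' then some 'A' else if c = 'a' then some 'A'
  else if c = 'T' then some 'T' else if c = 't' then some 'T'
  else if c = 'C' then some 'C' else if c = 'c' then some 'C'
  else if c = 'G' then some 'G' else if c = 'g' then some 'G'
  else none

-- the for-loop over the characters, state = (inHeader, atStart) = (in_header, at_line_start)
def csRun : List Char → Bool → Bool → List Char
  | [], _, _ => []
  | ch :: rest, inHeader, atStart =>
    if ch = '\n' ∨ ch = '\r' then csRun rest false true
    else
      let inH := if atStart then (ch == '>') else inHeader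
      if inH then csRun rest inH false
      else
        match csTable ch with
        | some d => d :: csRun rest inH false
        | none => csRun rest inH false

def clean_sequence_alt (raw : String) : String :=
  String.ofList (csRun (PySem.Str.lstrip raw).toList false true)

-- ===== PRECONDITION & SPEC =====
def Spec_clean_sequence (raw : String) (out : String) : Prop := out = clean_sequence_alt raw
instance (raw : String) (out : String) : Decidable (Spec_clean_sequence raw out) := by unfold Spec_clean_sequence; infer_instance

-- ===== CLAIM (what is proved, stated in full; the proofs are below) =====
def Claim_equal_clean_sequence : Prop := ∀ (raw : String), Dom_clean_sequence raw → Spec_clean_sequence raw (clean_sequence raw)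

-- ===== LEMMAS AND PROOFS =====

def pvBrk (c : Char) : Bool := c = '\n' ∨ c = '\r'
def auxL : List Char → List Char → List (List Char)
  | cur, [] => if cur = [] then [] else [cur]
  | cur, '\r' :: '\n' :: rest => cur :: auxL [] rest
  | cur, c :: rest => if pvBrk c then cur :: auxL [] rest else auxL (cur ++ [c]) rest

theorem go_eq_auxL (f : Char → Bool) (hf : ∀ c, pvDomChar c = true → f c = pvBrk c)
    (cur s : List Char) : s.all pvDomChar = true → ∀ (acc : List (List Char)),
      PySem.Chars.splitlines.go f s cur.reverse acc = acc.reverse ++ auxL cur s := by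
  induction cur, s using auxL.induct with
  | case1 =>
    intro _ acc
    rw [PySem.Chars.splitlines.go]
    simp [auxL]
  | case2 cur hcur =>
    intro _ acc
    rw [PySem.Chars.splitlines.go]
    simp [auxL, hcur]
  | case3 cur rest ih =>
    intro hall acc
    simp only [List.all_cons, Bool.and_eq_true] at hall
    rw [PySem.Chars.splitlines.go]
    simp only [List.reverse_nil] at ih
    rw [show (cur.reverse.reverse :: acc) = ((cur :: acc) : List (List Char)) from by simp]
    rw [ih hall.2.2 (cur :: acc)]
    simp [auxL]
  | case4 cur c rest hpat hbrk ih =>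
    intro hall acc
    simp only [List.all_cons, Bool.and_eq_true] at hall
    have hrw : auxL cur (c :: rest) = cur :: auxL [] rest := by
      rw [auxL]
      · rw [if_pos hbrk]
      · exact hpat
    rw [PySem.Chars.splitlines.go]
    · rw [hf c hall.1, if_pos hbrk]
      simp only [List.reverse_nil] at ih
      rw [show (cur.reverse.reverse :: acc) = ((cur :: acc) : List (List Char)) from by simp]
      rw [ih hall.2 (cur :: acc), hrw]
      simp
    · exact hpat
  | case5 cur c rest hpat hbrk ih =>
    intro hall acc
    simp only [List.all_cons, Bool.and_eq_true] at hall
    have hrw : auxL cur (c :: rest) = auxL (cur ++ [c]) rest := by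
      rw [auxL]
      · rw [if_neg hbrk]
      · exact hpat
    rw [PySem.Chars.splitlines.go]
    · rw [hf c hall.1, if_neg hbrk]
      rw [show (c :: cur.reverse) = ((cur ++ [c]).reverse : List Char) from by simp]
      rw [ih hall.2 acc, hrw]
    · exact hpat

theorem char_eq_of_toNat {c d : Char} (h : c.toNat = d.toNat) : c = d := by
  apply Char.ext; exact UInt32.toNat_inj.mp h

theorem splitlines_eq_auxL (s : List Char) (hs : s.all pvDomChar = true) :
    PySem.Chars.splitlines s = auxL [] s := by
  unfold PySem.Chars.splitlines
  rw [show ([] : List Char) = ([] : List Char).reverse from rfl]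
  rw [go_eq_auxL _ ?_ [] s hs []]
  · simp
  · intro c hc
    simp only [pvDomChar, Bool.or_eq_true, Bool.and_eq_true, decide_eq_true_eq,
      Nat.beq_eq_true_eq] at hc
    have e1 : (c = '\n') ↔ (c.toNat = 10) := ⟨fun h => by subst h; rfl, fun h => char_eq_of_toNat h⟩
    have e2 : (c = '\x0d') ↔ (c.toNat = 13) := ⟨fun h => by subst h; rfl, fun h => char_eq_of_toNat h⟩
    simp only [pvBrk, e1, e2]
    by_cases h10 : c.toNat = 10 <;> by_cases h13 : c.toNat = 13 <;>
      simp [h10, h13] <;> omega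



def perLine (l : List Char) : List Char :=
  (PySem.Chars.upper l).filter (fun c => "ATCG".toList.contains c)

def procLines (ls : List (List Char)) : List Char :=
  (ls.filter (fun l => !PySem.Chars.startswith l ['>'])).flatMap perLine

def firstSeg : List Char → List Char
  | [] => []
  | c :: r => if pvBrk c then [] else c :: firstSeg r

def afterFirst : List Char → List (List Char)
  | [] => []
  | '\r' :: '\n' :: r => auxL [] r
  | c :: r => if pvBrk c then auxL [] r else afterFirst r


theorem table_toList (c : Char) : (csTable c).toList = perLine [c] := by
  by_cases hA : c = 'A'; · subst hA; decide
  by_cases ha : c = 'a'; · subst ha; decide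
  by_cases hT : c = 'T'; · subst hT; decide
  by_cases ht : c = 't'; · subst ht; decide
  by_cases hC : c = 'C'; · subst hC; decide
  by_cases hc : c = 'c'; · subst hc; decide
  by_cases hG : c = 'G'; · subst hG; decide
  by_cases hg : c = 'g'; · subst hg; decide
  have htab : csTable c = none := by simp [csTable, hA, ha, hT, ht, hC, hc, hG, hg]
  have hne : ∀ d : Char, c ≠ d → c.toNat ≠ d.toNat := fun d h h2 => h (char_eq_of_toNat h2)
  have hup : PySem.Chars.upperChar c ≠ 'A' ∧ PySem.Chars.upperChar c ≠ 'T' ∧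
             PySem.Chars.upperChar c ≠ 'C' ∧ PySem.Chars.upperChar c ≠ 'G' := by
    unfold PySem.Chars.upperChar
    by_cases hl : PySem.Chars.islower c = true
    · simp only [hl, if_pos]
      have hb : 97 ≤ c.toNat ∧ c.toNat ≤ 122 := by
        simp only [PySem.Chars.islower, Bool.and_eq_true, decide_eq_true_eq, Char.le_def] at hl
        exact hl
      have hv : (Char.ofNat (c.toNat - 32)).toNat = c.toNat - 32 := by
        rw [Char.toNat_ofNat]
        have hvc : (c.toNat - 32).isValidChar := by constructor; omega
        simp [hvc]
      have k1 := hne 'a' ha; have k2 := hne 't' ht; have k3 := hne 'c' hc; have k4 := hne 'g' hg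
      simp only [show ('a':Char).toNat = 97 from rfl, show ('t':Char).toNat = 116 from rfl,
        show ('c':Char).toNat = 99 from rfl, show ('g':Char).toNat = 103 from rfl] at k1 k2 k3 k4
      refine ⟨?_, ?_, ?_, ?_⟩ <;> intro h <;> have h2 := congrArg Char.toNat h <;> rw [hv] at h2 <;>
        simp only [show ('A':Char).toNat = 65 from rfl, show ('T':Char).toNat = 84 from rfl,
          show ('C':Char).toNat = 67 from rfl, show ('G':Char).toNat = 71 from rfl] at h2 <;> omega
    · simp only [hl, if_neg, Bool.not_eq_true]
      exact ⟨hA, hT, hC, hG⟩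
  have hnot : ("ATCG".toList.contains (PySem.Chars.upperChar c)) = false := by
    simp only [show "ATCG".toList = ['A','T','C','G'] from rfl, List.contains_cons,
      List.contains_nil, Bool.or_eq_false_iff, beq_eq_false_iff_ne, ne_eq]
    exact ⟨hup.1, hup.2.1, hup.2.2.1, hup.2.2.2, trivial⟩
  simp [htab, perLine, PySem.Chars.upper, List.filter, hup.1, hup.2.1, hup.2.2.1, hup.2.2.2]

theorem procLines_cons (l : List Char) (ls : List (List Char)) :
    procLines (l :: ls) =
      (if PySem.Chars.startswith l ['>'] then [] else perLine l) ++ procLines ls := by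
  by_cases h : PySem.Chars.startswith l ['>'] <;> simp [procLines, h]

theorem procLines_nil_cons (ls : List (List Char)) : procLines ([] :: ls) = procLines ls := by
  rw [procLines_cons]
  simp [PySem.Chars.startswith, perLine, PySem.Chars.upper]

theorem auxL_ne (p s : List Char) : p ≠ [] → auxL p s = (p ++ firstSeg s) :: afterFirst s := by
  induction p, s using auxL.induct with
  | case1 => intro h; exact absurd rfl h
  | case2 cur hcur => intro _; simp [auxL, firstSeg, afterFirst, hcur]
  | case3 cur rest ih =>
    intro hp
    simp [auxL, firstSeg, afterFirst, pvBrk]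
  | case4 cur c rest hpat hbrk ih =>
    intro hp
    rw [auxL]
    · rw [if_pos hbrk, afterFirst]
      · rw [if_pos hbrk]
        rw [firstSeg, if_pos hbrk]
        simp
      · exact hpat
    · exact hpat
  | case5 cur c rest hpat hbrk ih =>
    intro hp
    rw [auxL]
    · rw [if_neg hbrk, ih (by simp), afterFirst]
      · rw [if_neg hbrk, firstSeg, if_neg hbrk]
        simp
      · exact hpat
    · exact hpat

theorem perLine_nil : perLine [] = [] := rfl

theorem perLine_cons (c : Char) (l : List Char) :
    perLine (c :: l) = perLine [c] ++ perLine l := by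
  simp only [perLine, PySem.Chars.upper, List.map_cons, List.filter_cons, List.map_nil,
    List.filter_nil]
  split <;> simp

theorem sw_gt (c : Char) (l : List Char) :
    PySem.Chars.startswith (c :: l) ['>'] = (c == '>') := by
  simp [PySem.Chars.startswith, List.isPrefixOf, eq_comm]

theorem auxL_nil_brk (c : Char) (r : List Char) (hb : pvBrk c = true) :
    procLines (auxL [] (c :: r)) = procLines (auxL [] r) := by
  by_cases hp : c = '\r' ∧ ∃ r', r = '\n' :: r'
  · obtain ⟨hc, r', hr⟩ := hp
    subst hc; subst hr
    rw [show auxL [] ('\r' :: '\n' :: r') = [] :: auxL [] r' from by rw [auxL]]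
    rw [show auxL [] ('\n' :: r') = [] :: auxL [] r' from by simp [auxL, pvBrk]]
  · have hpat : ∀ (r1 : List Char), c = '\r' → r = '\n' :: r1 → False := by
      intro r1 h1 h2; exact hp ⟨h1, r1, h2⟩
    rw [show auxL [] (c :: r) = [] :: auxL [] r from by
      rw [auxL]
      · rw [if_pos hb]
      · exact hpat]
    rw [procLines_nil_cons]

theorem afterFirst_brk (c : Char) (r : List Char) (hb : pvBrk c = true) :
    procLines (afterFirst (c :: r)) = procLines (auxL [] r) := by
  by_cases hp : c = '\r' ∧ ∃ r', r = '\n' :: r'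
  · obtain ⟨hc, r', hr⟩ := hp
    subst hc; subst hr
    rw [show afterFirst ('\r' :: '\n' :: r') = auxL [] r' from by rw [afterFirst]]
    rw [auxL_nil_brk '\n' r' (by decide)]
  · have hpat : ∀ (r1 : List Char), c = '\r' → r = '\n' :: r1 → False := by
      intro r1 h1 h2; exact hp ⟨h1, r1, h2⟩
    rw [show afterFirst (c :: r) = auxL [] r from by
      rw [afterFirst]
      · rw [if_pos hb]
      · exact hpat]

theorem afterFirst_nb (c : Char) (r : List Char) (hb : pvBrk c = false) :
    afterFirst (c :: r) = afterFirst r := by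
  rw [afterFirst]
  · rw [if_neg (by simp [hb])]
  · intro r1 h1 h2; subst h1; simp [pvBrk] at hb

theorem firstSeg_nb (c : Char) (r : List Char) (hb : pvBrk c = false) :
    firstSeg (c :: r) = c :: firstSeg r := by
  rw [firstSeg, if_neg (by simp [hb])]

theorem auxL_nil_nb (c : Char) (r : List Char) (hb : pvBrk c = false) :
    auxL [] (c :: r) = (c :: firstSeg r) :: afterFirst r := by
  rw [auxL]
  · rw [if_neg (by simp [hb])]
    simp only [List.nil_append]
    rw [auxL_ne [c] r (by simp)]
    simp
  · intro r1 h1 h2; subst h1; simp [pvBrk] at hb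

theorem csRun_brk (c : Char) (r : List Char) (hb : c = '\n' ∨ c = '\r') (ih a : Bool) :
    csRun (c :: r) ih a = csRun r false true := by
  rw [csRun, if_pos hb]

theorem csRun_bol_gt (c : Char) (r : List Char) (hb : ¬(c = '\n' ∨ c = '\r')) (hgt : c = '>')
    (b : Bool) : csRun (c :: r) b true = csRun r true false := by
  subst hgt
  rw [csRun, if_neg hb]
  rfl

theorem csRun_bol_ngt (c : Char) (r : List Char) (hb : ¬(c = '\n' ∨ c = '\r'))
    (hgtb : (c == '>') = false) (b : Bool) :
    csRun (c :: r) b true =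
      (match csTable c with
        | some d => d :: csRun r false false
        | none => csRun r false false) := by
  rw [csRun, if_neg hb]
  show (if (c == '>') = true then _ else _) = _
  rw [hgtb]
  simp

theorem csRun_mid_hdr (c : Char) (r : List Char) (hb : ¬(c = '\n' ∨ c = '\r')) :
    csRun (c :: r) true false = csRun r true false := by
  rw [csRun, if_neg hb]
  rfl

theorem csRun_mid_nohdr (c : Char) (r : List Char) (hb : ¬(c = '\n' ∨ c = '\r')) :
    csRun (c :: r) false false =
      (match csTable c with
        | some d => d :: csRun r false false
        | none => csRun r false false) := by
  rw [csRun, if_neg hb]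
  rfl

theorem match_table (c : Char) (X : List Char) :
    (match csTable c with
      | some d => d :: X
      | none => X) = perLine [c] ++ X := by
  rw [← table_toList c]
  cases csTable c <;> simp

theorem fsm_spec (s : List Char) :
    (csRun s false true = procLines (auxL [] s)) ∧
    (∀ skip, csRun s skip false =
      (if skip then [] else perLine (firstSeg s)) ++ procLines (afterFirst s)) := by
  induction s with
  | nil =>
    constructor
    · rfl
    · intro skip; cases skip <;> rfl
  | cons c r ih =>
    by_cases hb : c = '\n' ∨ c = '\r'
    · have hbb : pvBrk c = true := by simp [pvBrk, hb]
      constructor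
      · rw [csRun_brk c r hb, ih.1, auxL_nil_brk c r hbb]
      · intro skip
        rw [csRun_brk c r hb, ih.1, ← afterFirst_brk c r hbb]
        rw [show firstSeg (c :: r) = [] from by rw [firstSeg, if_pos hbb]]
        cases skip <;> simp [perLine_nil]
    · have hbb : pvBrk c = false := by simp [pvBrk]; tauto
      constructor
      · by_cases hgt : c = '>'
        · rw [csRun_bol_gt c r hb hgt, ih.2 true]
          rw [auxL_nil_nb c r hbb, procLines_cons, sw_gt]
          simp [hgt]
        · have hgtb : (c == '>') = false := by simp [hgt]
          rw [csRun_bol_ngt c r hb hgtb, match_table, ih.2 false]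
          rw [auxL_nil_nb c r hbb, procLines_cons, sw_gt, hgtb]
          rw [perLine_cons c (firstSeg r)]
          simp [perLine_nil]
      · intro skip
        cases skip
        · rw [csRun_mid_nohdr c r hb, match_table, ih.2 false]
          rw [afterFirst_nb c r hbb, firstSeg_nb c r hbb, perLine_cons c (firstSeg r)]
          simp [perLine_nil]
        · rw [csRun_mid_hdr c r hb, ih.2 true, afterFirst_nb c r hbb]
          simp

def pvWSb (c : Char) : Bool := c = ' ' ∨ c = '\t' ∨ c = '\n' ∨ c = '\r'

theorem ws_perLine (c : Char) (hw : pvWSb c = true) (hb : pvBrk c = false) : perLine [c] = [] := by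
  have h : c = ' ' ∨ c = '\t' := by
    revert hw hb; simp [pvWSb, pvBrk]; tauto
  rcases h with h | h <;> subst h <;> decide

theorem ws_ngt (c : Char) (hw : pvWSb c = true) : (c == '>') = false := by
  revert hw; simp [pvWSb]
  rintro (h | h | h | h) <;> subst h <;> decide

theorem perLine_append (l1 l2 : List Char) : perLine (l1 ++ l2) = perLine l1 ++ perLine l2 := by
  simp [perLine, PySem.Chars.upper]

theorem auxL_cons_rn (cur s : List Char) : auxL cur ('\r' :: '\n' :: s) = cur :: auxL [] s := by
  rw [auxL]

theorem auxL_cons_brk (cur s : List Char) (c : Char) (hb : pvBrk c = true)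
    (hpat : ∀ (r1 : List Char), c = '\r' → s = '\n' :: r1 → False) :
    auxL cur (c :: s) = cur :: auxL [] s := by
  rw [auxL]
  · rw [if_pos hb]
  · exact hpat

theorem auxL_cons_nb (cur s : List Char) (c : Char) (hb : pvBrk c = false) :
    auxL cur (c :: s) = auxL (cur ++ [c]) s := by
  rw [auxL]
  · rw [if_neg (by simp [hb])]
  · intro r1 h1 h2; subst h1; simp [pvBrk] at hb

theorem sw_append (cur : List Char) (c : Char) (hcur : cur ≠ []) :
    PySem.Chars.startswith (cur ++ [c]) ['>'] = PySem.Chars.startswith cur ['>'] := by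
  rcases cur with _ | ⟨c0, cur'⟩
  · exact absurd rfl hcur
  · simp only [List.cons_append, sw_gt]

theorem wnil (p w : List Char) (hw : w.all pvWSb = true) :
    procLines (auxL p w) = procLines (auxL p []) := by
  induction p, w using auxL.induct with
  | case1 => rfl
  | case2 cur hcur => rfl
  | case3 cur rest ih =>
    simp only [List.all_cons, Bool.and_eq_true] at hw
    rw [auxL_cons_rn, procLines_cons, ih hw.2.2]
    rw [show auxL ([] : List Char) [] = [] from rfl]
    rw [auxL]
    by_cases hcur : cur = []
    · subst hcur
      rw [if_pos rfl]
      simp [procLines, perLine, PySem.Chars.upper]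
    · rw [if_neg hcur, procLines_cons]
  | case4 cur c rest hpat hbrk ih =>
    simp only [List.all_cons, Bool.and_eq_true] at hw
    rw [auxL_cons_brk cur rest c (by simpa using hbrk) hpat, procLines_cons, ih hw.2]
    rw [show auxL ([] : List Char) [] = [] from rfl]
    rw [auxL]
    by_cases hcur : cur = []
    · subst hcur
      rw [if_pos rfl]
      simp [procLines, perLine, PySem.Chars.upper]
    · rw [if_neg hcur, procLines_cons]
  | case5 cur c rest hpat hbrk ih =>
    simp only [List.all_cons, Bool.and_eq_true] at hw
    have hbb : pvBrk c = false := by simpa using hbrk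
    rw [auxL_cons_nb cur rest c hbb, ih hw.2]
    rw [show auxL (cur ++ [c]) [] = [cur ++ [c]] from by rw [auxL]; simp]
    rw [auxL]
    by_cases hcur : cur = []
    · subst hcur
      rw [if_pos rfl]
      simp only [List.nil_append]
      rw [procLines_cons, sw_gt, ws_ngt c hw.1]
      simp [ws_perLine c hw.1 hbb, procLines]
    · rw [if_neg hcur, procLines_cons, procLines_cons]
      rw [sw_append cur c hcur, perLine_append, ws_perLine c hw.1 hbb]
      simp

theorem wapp (w : List Char) (hw : w.all pvWSb = true) (p s : List Char) :
    procLines (auxL p (s ++ w)) = procLines (auxL p s) := by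
  induction p, s using auxL.induct with
  | case1 =>
    simp only [List.nil_append]
    exact wnil [] w hw
  | case2 cur hcur =>
    simp only [List.nil_append]
    exact wnil cur w hw
  | case3 cur rest ih =>
    simp only [List.cons_append]
    rw [auxL_cons_rn, auxL_cons_rn, procLines_cons, procLines_cons, ih]
  | case4 cur c rest hpat hbrk ih =>
    have hbb : pvBrk c = true := by simpa using hbrk
    simp only [List.cons_append]
    rcases rest with _ | ⟨c0, rest'⟩
    · simp only [List.nil_append]
      have hRHS : auxL cur [c] = cur :: auxL [] [] :=
        auxL_cons_brk cur [] c hbb (by intro r1 _ h; cases h)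
      rw [hRHS]
      by_cases hrw : c = '\r' ∧ ∃ w', w = '\n' :: w'
      · obtain ⟨hc, w', hw'⟩ := hrw
        subst hc; subst hw'
        simp only [List.all_cons, Bool.and_eq_true] at hw
        rw [auxL_cons_rn, procLines_cons, procLines_cons, wnil [] w' hw.2]
      · have hpat2 : ∀ (r1 : List Char), c = '\r' → w = '\n' :: r1 → False := by
          intro r1 h1 h2; exact hrw ⟨h1, r1, h2⟩
        rw [auxL_cons_brk cur w c hbb hpat2, procLines_cons, procLines_cons, wnil [] w hw]
    · have hpat2 : ∀ (r1 : List Char), c = '\r' → (c0 :: rest') ++ w = '\n' :: r1 → False := by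
        intro r1 h1 h2
        simp only [List.cons_append, List.cons.injEq] at h2
        exact hpat rest' h1 (by rw [h2.1])
      rw [auxL_cons_brk cur ((c0 :: rest') ++ w) c hbb hpat2,
          auxL_cons_brk cur (c0 :: rest') c hbb hpat,
          procLines_cons, procLines_cons, ih]
  | case5 cur c rest hpat hbrk ih =>
    have hbb : pvBrk c = false := by simpa using hbrk
    simp only [List.cons_append]
    rw [auxL_cons_nb cur (rest ++ w) c hbb, auxL_cons_nb cur rest c hbb, ih]



theorem pv_foldl_skip_append {α β : Type} (p : α → Bool) (f : α → β) :
    ∀ (l : List α) (acc : List β),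
      l.foldl (fun acc x => if p x then acc else acc ++ [f x]) acc
        = acc ++ (l.filter (fun x => !p x)).map f := by
  intro l
  induction l with
  | nil => simp
  | cons x xs ih =>
    intro acc
    by_cases h : p x = true <;> simp [List.foldl_cons, h, ih]

theorem all_sublist {α : Type} {q : α → Bool} {l1 l2 : List α} (h : List.Sublist l1 l2)
    (ha : l2.all q = true) : l1.all q = true := by
  simp only [List.all_eq_true] at *
  exact fun x hx => ha x (h.subset hx)

theorem dom_isspace_ws (c : Char) (hd : pvDomChar c = true) (hs : PySem.Chars.isspace c = true) :
    pvWSb c = true := by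
  simp only [pvDomChar, Bool.or_eq_true, Bool.and_eq_true, decide_eq_true_eq,
    Nat.beq_eq_true_eq] at hd
  simp only [PySem.Chars.isspace, Bool.or_eq_true, Bool.and_eq_true, decide_eq_true_eq] at hs
  have e1 : (c = ' ') ↔ (c.toNat = 32) := ⟨fun h => by subst h; rfl, fun h => char_eq_of_toNat h⟩
  have e2 : (c = '\t') ↔ (c.toNat = 9) := ⟨fun h => by subst h; rfl, fun h => char_eq_of_toNat h⟩
  have e3 : (c = '\n') ↔ (c.toNat = 10) := ⟨fun h => by subst h; rfl, fun h => char_eq_of_toNat h⟩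
  have e4 : (c = '\r') ↔ (c.toNat = 13) := ⟨fun h => by subst h; rfl, fun h => char_eq_of_toNat h⟩
  simp only [pvWSb, decide_eq_true_eq, e1, e2, e3, e4]
  omega

theorem clean_sequence_eq (raw : String) (hd : pvDomStr raw = true) :
    clean_sequence raw = clean_sequence_alt raw := by
  unfold clean_sequence clean_sequence_alt
  simp only []
  simp only [pvDomStr] at hd
  -- A side: foldl → filter/map, move to List Char
  rw [pv_foldl_skip_append]
  simp only [List.nil_append]
  -- name the stripped text
  have hsdom : (PySem.Chars.lstrip raw.toList).all pvDomChar = true :=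
    all_sublist (List.dropWhile_sublist _) hd
  have hrdom : (PySem.Chars.strip raw.toList).all pvDomChar = true := by
    unfold PySem.Chars.strip PySem.Chars.rstrip
    rw [List.all_reverse]
    exact all_sublist (List.dropWhile_sublist _) (by rw [List.all_reverse]; exact hsdom)
  refine congrArg String.ofList ?_
  -- turn A's string-level pipeline into procLines over char lines
  have hlines : (((PySem.Str.splitlines (PySem.Str.strip raw)).filter
        (fun l => !PySem.Str.startswith l ">")).map
          (fun line => (PySem.Str.upper line).toList.filter (fun c => "ATCG".toList.contains c))).flatten
       = procLines (PySem.Chars.splitlines (PySem.Chars.strip raw.toList)) := by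
    have h1 : PySem.Chars.splitlines (PySem.Chars.strip raw.toList)
        = (PySem.Str.splitlines (PySem.Str.strip raw)).map String.toList := by
      rw [PySem.Str.splitlines_map_toList, PySem.Str.toList_strip]
    rw [h1]
    simp only [procLines, List.filter_map, List.flatMap_map, List.flatten_eq_flatMap]
    simp [perLine, Function.comp_def]
  rw [hlines]
  rw [splitlines_eq_auxL _ hrdom]
  -- drop the right strip via wapp
  have hdec : PySem.Chars.lstrip raw.toList =
      PySem.Chars.strip raw.toList ++
        ((PySem.Chars.lstrip raw.toList).reverse.takeWhile PySem.Chars.isspace).reverse := by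
    unfold PySem.Chars.strip PySem.Chars.rstrip
    conv_lhs => rw [show PySem.Chars.lstrip raw.toList =
        (PySem.Chars.lstrip raw.toList).reverse.reverse from (List.reverse_reverse _).symm,
      ← List.takeWhile_append_dropWhile (p := PySem.Chars.isspace)
        (l := (PySem.Chars.lstrip raw.toList).reverse)]
    rw [List.reverse_append]
  have hwws : (((PySem.Chars.lstrip raw.toList).reverse.takeWhile PySem.Chars.isspace).reverse).all
      pvWSb = true := by
    simp only [List.all_eq_true, List.mem_reverse]
    intro c hc
    have hsp := List.mem_takeWhile_imp hc
    have hcdom : pvDomChar c = true := by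
      have : c ∈ PySem.Chars.lstrip raw.toList := by
        rw [← List.mem_reverse]
        exact (List.takeWhile_sublist _).subset hc
      simp only [List.all_eq_true] at hsdom
      exact hsdom c this
    exact dom_isspace_ws c hcdom hsp
  rw [show procLines (auxL [] (PySem.Chars.strip raw.toList)) =
      procLines (auxL [] (PySem.Chars.lstrip raw.toList)) from by
    rw [hdec, wapp _ hwws]]
  -- B side
  rw [show (PySem.Str.lstrip raw).toList = PySem.Chars.lstrip raw.toList from by
    simp [PySem.Str.lstrip]]
  exact (fsm_spec _).1.symm

-- ===== VERDICT (by name: the statement is the Claim_ definition above) =====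
theorem clean_sequence_spec : Claim_equal_clean_sequence := by
  intro raw hd
  exact clean_sequence_eq raw hd
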